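-- pv_equiv track=rewrite | github.com/AtrCheema/AI4Water | ai4water/hyperopt/_fanova.py | encoded_columns
-- ===== SOURCE A (Python) =====
-- def encoded_columns(cols:dict):
--     # c = {'a': 2, 'b': 1, 'c': 3}
--     # -> {'a': [0,1], 'b': [2], 'c': [3,4,5]}
--     en = 0
--     st = 0
--     columns = {}
--     for k, v in cols.items():
--         en += v
--         columns[k] = [i for i in range(st, en)]
--         st += v
--     return columns
-- ===== SOURCE B (Python) =====
-- def encoded_columns(cols: dict):
--     # Two passes: build a prefix-sum boundary table, then pair each key
--     # with its adjacent (start, end) boundaries and emit the range.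
--     bounds = [0]
--     for v in cols.values():
--         bounds.append(bounds[-1] + v)
--     out = {}
--     for k, (b, e) in zip(cols, zip(bounds, bounds[1:])):
--         out[k] = list(range(b, e))
--     return out
-- ===== Notes on version B (the rewrite author's own statement) =====
-- stated objective: alternative
-- what changed: Replaces the single loop that threads running start/end offsets with two separate passes: a prefix-sum boundary table built first, then a zip of keys with adjacent boundary pairs emitting each range.
import Mathlib
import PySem

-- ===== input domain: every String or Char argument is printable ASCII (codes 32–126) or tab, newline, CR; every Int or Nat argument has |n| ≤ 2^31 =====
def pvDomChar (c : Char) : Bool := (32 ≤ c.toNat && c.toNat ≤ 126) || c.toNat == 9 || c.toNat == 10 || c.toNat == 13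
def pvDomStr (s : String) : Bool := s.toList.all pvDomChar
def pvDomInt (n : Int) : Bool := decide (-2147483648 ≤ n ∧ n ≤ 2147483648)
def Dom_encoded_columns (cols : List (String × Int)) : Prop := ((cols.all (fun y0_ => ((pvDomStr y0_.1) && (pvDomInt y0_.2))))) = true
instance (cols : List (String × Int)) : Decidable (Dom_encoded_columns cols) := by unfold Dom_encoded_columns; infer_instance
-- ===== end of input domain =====

-- B replaces A's single offset-threading loop by two passes (prefix-sum boundary table, then a zip pass); alternative decomposition, same cost.


-- ===== PORT A =====
-- one loop threading en/st and inserting [i for i in range(st, en)]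
def encoded_columns (cols : List (String × Int)) : List (String × List Int) :=
  (cols.foldl
    (fun (s : Int × Int × PySem.Dict String (List Int)) kv =>
      let en := s.1 + kv.2
      let columns := s.2.2.insert kv.1 (PySem.List.pyRange s.2.1 en 1)
      (en, s.2.1 + kv.2, columns))
    (0, 0, PySem.Dict.empty)).2.2.items

-- ===== PORT B =====
-- pass 1: prefix-sum boundary table; pass 2: zip keys with adjacent boundary pairs
def encoded_columns_alt (cols : List (String × Int)) : List (String × List Int) :=
  let bounds := cols.foldl (fun b kv => b ++ [b.getLastD 0 + kv.2]) [0]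
  (((cols.map Prod.fst).zip (bounds.zip bounds.tail)).foldl
    (fun (d : PySem.Dict String (List Int)) kbe =>
      d.insert kbe.1 (PySem.List.pyRange kbe.2.1 kbe.2.2 1))
    PySem.Dict.empty).items

-- ===== PRECONDITION & SPEC =====
def Spec_encoded_columns (cols : List (String × Int)) (out : List (String × List Int)) : Prop := out = encoded_columns_alt cols
instance (cols : List (String × Int)) (out : List (String × List Int)) : Decidable (Spec_encoded_columns cols out) := by unfold Spec_encoded_columns; infer_instance

-- ===== CLAIM (what is proved, stated in full; the proofs are below) =====
def Claim_equal_encoded_columns : Prop := ∀ (cols : List (String × Int)), Dom_encoded_columns cols → Spec_encoded_columns cols (encoded_columns cols)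

-- ===== LEMMAS AND PROOFS =====

/-- Boundary list of prefix sums starting at `s` (abstract spec both ports reach). -/
def pvPre (s : Int) : List (String × Int) → List Int
  | [] => [s]
  | kv :: t => s :: pvPre (s + kv.2) t

/-- Common abstract loop: insert each key's range, threading one running offset. -/
def pvGo : Int → List (String × Int) → PySem.Dict String (List Int) → PySem.Dict String (List Int)
  | _, [], d => d
  | s, kv :: t, d => pvGo (s + kv.2) t (d.insert kv.1 (PySem.List.pyRange s (s + kv.2) 1))

theorem pvPre_eq_cons (s : Int) (l : List (String × Int)) :
    pvPre s l = s :: (pvPre s l).tail := by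
  cases l <;> rfl

theorem boundsFold_eq (cols : List (String × Int)) :
    ∀ (init : List Int) (p : Int),
      cols.foldl (fun b kv => b ++ [b.getLastD 0 + kv.2]) (init ++ [p]) = init ++ pvPre p cols := by
  induction cols with
  | nil => intro init p; rfl
  | cons kv t ih =>
      intro init p
      simp only [List.foldl_cons]
      have hlast : (init ++ [p]).getLastD 0 = p := by
        simp [List.getLastD_eq_getLast?]
      rw [hlast]
      rw [ih (init ++ [p]) (p + kv.2)]
      simp [pvPre]

theorem zipFold_eq (cols : List (String × Int)) :
    ∀ (s : Int) (d : PySem.Dict String (List Int)),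
      (((cols.map Prod.fst).zip ((pvPre s cols).zip (pvPre s cols).tail)).foldl
        (fun (d : PySem.Dict String (List Int)) kbe =>
          d.insert kbe.1 (PySem.List.pyRange kbe.2.1 kbe.2.2 1)) d) = pvGo s cols d := by
  induction cols with
  | nil => intro s d; rfl
  | cons kv t ih =>
      intro s d
      obtain ⟨rest, hr⟩ : ∃ r, pvPre (s + kv.2) t = (s + kv.2) :: r :=
        ⟨_, pvPre_eq_cons _ _⟩
      have h : pvPre s (kv :: t) = s :: pvPre (s + kv.2) t := rfl
      rw [h, hr]
      simp only [List.map_cons, List.tail_cons, List.zip_cons_cons, List.foldl_cons]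
      have hrest : rest = (pvPre (s + kv.2) t).tail := by rw [hr, List.tail_cons]
      rw [← hr, hrest]
      exact ih (s + kv.2) _

theorem aFold_eq (cols : List (String × Int)) :
    ∀ (s : Int) (d : PySem.Dict String (List Int)),
      (cols.foldl
        (fun (st : Int × Int × PySem.Dict String (List Int)) kv =>
          let en := st.1 + kv.2
          let columns := st.2.2.insert kv.1 (PySem.List.pyRange st.2.1 en 1)
          (en, st.2.1 + kv.2, columns))
        (s, s, d)).2.2 = pvGo s cols d := by
  induction cols with
  | nil => intro s d; rfl
  | cons kv t ih =>
      intro s d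
      simp only [List.foldl_cons]
      exact ih (s + kv.2) _

-- ===== VERDICT (by name: the statement is the Claim_ definition above) =====
theorem encoded_columns_spec : Claim_equal_encoded_columns := by
  intro cols _
  show encoded_columns cols = encoded_columns_alt cols
  unfold encoded_columns encoded_columns_alt
  have hb := boundsFold_eq cols [] 0
  simp only [List.nil_append] at hb
  rw [hb]
  exact congrArg PySem.Dict.items
    ((aFold_eq cols 0 PySem.Dict.empty).trans (zipFold_eq cols 0 PySem.Dict.empty).symm)
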